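-- pv_equiv track=rewrite | github.com/pypi-data/pypi-mirror-395 | packages/calt-x/calt_x-0.3.0.tar.gz/calt_x-0.3.0/src/calt/data_loader/utils/preprocessor.py | _chunk_numeric_string
-- ===== SOURCE A (Python) =====
-- def _chunk_numeric_string(digits: str, k: int) -> list[str]:
--     """Split a numeric string into groups of size ``k`` without zero padding."""
--     if k <= 0 or not digits:
--         return [digits]
--
--     chunks: list[str] = []
--     idx = len(digits)
--     while idx > 0:
--         start = max(0, idx - k)
--         chunks.append(digits[start:idx])
--         idx = start
--     chunks.reverse()
--     return chunks
-- ===== SOURCE B (Python) =====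
-- def _chunk_numeric_string(digits: str, k: int) -> list[str]:
--     """Split a numeric string into groups of size ``k`` without zero padding."""
--     if k <= 0 or not digits:
--         return [digits]
--
--     n = len(digits)
--     rem = n % k
--     chunks = [digits[:rem]] if rem else []
--     for i in range(rem, n, k):
--         chunks.append(digits[i:i + k])
--     return chunks
-- ===== Notes on version B (the rewrite author's own statement) =====
-- stated objective: simpler
-- what changed: Replaces the backward while-loop that steps idx down by k, appends chunks and reverses the list at the end by a single forward pass: the first-chunk length is computed as len(digits) % k, then chunks are sliced left-to-right with range(rem, n, k), so no reversal and no mutable index.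
import Mathlib
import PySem

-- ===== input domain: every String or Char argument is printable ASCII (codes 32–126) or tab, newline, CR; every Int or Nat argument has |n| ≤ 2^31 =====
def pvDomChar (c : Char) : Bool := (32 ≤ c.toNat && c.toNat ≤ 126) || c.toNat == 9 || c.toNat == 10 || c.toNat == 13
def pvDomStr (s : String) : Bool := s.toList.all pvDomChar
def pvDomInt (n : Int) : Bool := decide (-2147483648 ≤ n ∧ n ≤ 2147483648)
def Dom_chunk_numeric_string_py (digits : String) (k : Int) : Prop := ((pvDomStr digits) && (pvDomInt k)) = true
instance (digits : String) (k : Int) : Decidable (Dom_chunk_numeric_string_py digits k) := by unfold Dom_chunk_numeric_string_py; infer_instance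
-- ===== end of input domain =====

-- B replaces A's backward while-loop plus final reverse by one forward pass whose first-chunk
-- length is len % k; same return value on every input (objective: simpler).


-- ===== PORT A =====
-- the while-loop: idx counts down from len(digits); fuel bounds the iteration count (idx
-- strictly decreases while positive, so fuel = idx.toNat at the call site suffices)
def pvALoop (digits : String) (k : Int) : Nat → Int → List String → List String
  | 0, _, chunks => chunks
  | fuel + 1, idx, chunks =>
    if 0 < idx then
      let start := max 0 (idx - k)
      pvALoop digits k fuel start (chunks ++ [PySem.Str.slice digits (some start) (some idx)])
    else chunks

def chunk_numeric_string_py (digits : String) (k : Int) : List String :=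
  if k ≤ 0 ∨ digits.toList = [] then [digits]
  else
    let n : Int := PySem.Str.len digits
    (pvALoop digits k n.toNat n []).reverse

-- ===== PORT B =====
def chunk_numeric_string_py_alt (digits : String) (k : Int) : List String :=
  if k ≤ 0 ∨ digits.toList = [] then [digits]
  else
    let n : Int := PySem.Str.len digits
    let rem : Int := PySem.Int.mod n k
    let init : List String := if rem ≠ 0 then [PySem.Str.slice digits (some 0) (some rem)] else []
    (PySem.List.pyRange rem n k).foldl
      (fun acc i => acc ++ [PySem.Str.slice digits (some i) (some (i + k))]) init

-- ===== PRECONDITION & SPEC =====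
def Spec_chunk_numeric_string_py (digits : String) (k : Int) (out : List String) : Prop := out = chunk_numeric_string_py_alt digits k
instance (digits : String) (k : Int) (out : List String) : Decidable (Spec_chunk_numeric_string_py digits k out) := by unfold Spec_chunk_numeric_string_py; infer_instance

-- ===== CLAIM (what is proved, stated in full; the proofs are below) =====
def Claim_equal_chunk_numeric_string_py : Prop := ∀ (digits : String) (k : Int), Dom_chunk_numeric_string_py digits k → Spec_chunk_numeric_string_py digits k (chunk_numeric_string_py digits k)

-- ===== LEMMAS AND PROOFS =====

lemma pvALoop_zero (digits : String) (k : Int) (fuel : Nat) (chunks : List String) :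
    pvALoop digits k fuel 0 chunks = chunks := by
  cases fuel <;> simp [pvALoop]

-- characterisation of A's loop: starting at idx = rem + k*q it appends the q full chunks
-- right-to-left, then (iff rem > 0) the leftover chunk digits[0:rem]
lemma pvALoop_eq (digits : String) (k rem : Int) (hk : 0 < k) (h0 : 0 ≤ rem) (h1 : rem < k)
    (q : Nat) : ∀ (fuel : Nat) (chunks : List String), (rem + k * (q : Int)).toNat ≤ fuel →
    pvALoop digits k fuel (rem + k * (q : Int)) chunks
      = chunks
        ++ ((List.range q).map
              (fun j : Nat => PySem.Str.slice digits (some (rem + k * (j : Int))) (some (rem + k * (j : Int) + k)))).reverse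
        ++ (if 0 < rem then [PySem.Str.slice digits (some 0) (some rem)] else []) := by
  induction q with
  | zero =>
    intro fuel chunks hfuel
    simp only [Nat.cast_zero, mul_zero, add_zero] at hfuel ⊢
    by_cases hr : 0 < rem
    · obtain ⟨f, rfl⟩ : ∃ f, fuel = f + 1 := ⟨fuel - 1, by omega⟩
      have hst : max 0 (rem - k) = 0 := by omega
      simp only [pvALoop, if_pos hr, hst, pvALoop_zero]
      simp
    · have : rem = 0 := by omega
      subst this
      simp [pvALoop_zero]
  | succ q ih =>
    intro fuel chunks hfuel
    have hkq : (0 : Int) ≤ k * (q : Int) := by positivity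
    have hsum : k * ((q : Int) + 1) = k * (q : Int) + k := by ring
    have hidx : (0 : Int) < rem + k * ((q + 1 : Nat) : Int) := by push_cast; omega
    obtain ⟨f, rfl⟩ : ∃ f, fuel = f + 1 := by
      refine ⟨fuel - 1, ?_⟩
      push_cast at hfuel hidx
      omega
    have hst : max 0 (rem + k * ((q + 1 : Nat) : Int) - k) = rem + k * (q : Int) := by
      push_cast; omega
    have hrec : (rem + k * ((q : Nat) : Int)).toNat ≤ f := by
      push_cast at hfuel
      omega
    simp only [pvALoop, if_pos hidx, hst]
    rw [ih f _ hrec]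
    rw [List.range_succ]
    rw [show rem + k * ((q + 1 : Nat) : Int) = rem + k * ((q : Nat) : Int) + k from by push_cast; ring]
    simp [List.reverse_append]

lemma pvFoldl_app (digits : String) (k : Int) :
    ∀ (l : List Int) (init : List String),
    l.foldl (fun acc i => acc ++ [PySem.Str.slice digits (some i) (some (i + k))]) init
      = init ++ l.map (fun i => PySem.Str.slice digits (some i) (some (i + k))) := by
  intro l
  induction l with
  | nil => simp
  | cons x xs ih => intro init; simp [List.foldl_cons, ih]

lemma pvCore (digits : String) (k : Int) (hk : 0 < k) (hd : digits.toList ≠ []) :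
    chunk_numeric_string_py digits k = chunk_numeric_string_py_alt digits k := by
  have hguard : ¬ (k ≤ 0 ∨ digits.toList = []) := by
    push_neg
    exact ⟨by omega, hd⟩
  have hkne : k ≠ 0 := by omega
  have hnpos : 0 < PySem.Str.len digits := by
    rw [PySem.Str.len_eq]
    have : digits.toList.length ≠ 0 := by simpa using hd
    omega
  set n : Int := PySem.Str.len digits with hn
  have hremE : PySem.Int.mod n k = n % k := by
    have h := @Int.emod_eq_fmod n k
    rw [if_pos (Or.inl (le_of_lt hk))] at h
    simp only [PySem.Int.mod]
    omega
  obtain ⟨r, hr⟩ : ∃ r : Int, r = n % k := ⟨n % k, rfl⟩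
  have h0 : 0 ≤ r := hr ▸ Int.emod_nonneg n hkne
  have h1 : r < k := hr ▸ Int.emod_lt_of_pos n hk
  have hqnn : 0 ≤ n / k := Int.ediv_nonneg (le_of_lt hnpos) (by omega)
  obtain ⟨q, hqz⟩ : ∃ q : Nat, (q : Int) = n / k := ⟨(n / k).toNat, Int.toNat_of_nonneg hqnn⟩
  have hnq : n = r + k * (q : Int) := by
    have h2 := Int.ediv_add_emod n k
    rw [hr, hqz]
    linarith
  have hA : chunk_numeric_string_py digits k
      = (if 0 < r then [PySem.Str.slice digits (some 0) (some r)] else [])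
        ++ (List.range q).map
              (fun j : Nat => PySem.Str.slice digits (some (r + k * (j : Int))) (some (r + k * (j : Int) + k))) := by
    simp only [chunk_numeric_string_py]
    rw [if_neg hguard, ← hn, hnq]
    rw [pvALoop_eq digits k r hk h0 h1 q _ [] (le_refl _)]
    by_cases hrp : 0 < r <;> simp [hrp, List.reverse_append]
  have hq' : (if r < n then ((n - r + k - 1) / k).toNat else 0) = q := by
    by_cases hq0 : q = 0
    · have : ¬ r < n := by rw [hnq, hq0]; push_cast; omega
      rw [if_neg this, hq0]
    · have hkq : (k : Int) * 1 ≤ k * (q : Int) := by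
        have : (1 : Int) ≤ (q : Int) := by exact_mod_cast Nat.one_le_iff_ne_zero.mpr hq0
        exact mul_le_mul_of_nonneg_left this (by omega)
      have hlt : r < n := by rw [hnq]; linarith
      rw [if_pos hlt, hnq]
      rw [show r + k * (q : Int) - r + k - 1 = (k - 1) + (q : Int) * k from by ring]
      rw [Int.add_mul_ediv_right _ _ hkne, Int.ediv_eq_zero_of_lt (by omega) (by omega)]
      omega
  have hcnt : PySem.List.pyRange r n k
      = (List.range q).map (fun j : Nat => r + k * (j : Int)) := by
    rw [PySem.List.pyRange_of_pos r n hk, hq']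
  have hB : chunk_numeric_string_py_alt digits k
      = (if r ≠ 0 then [PySem.Str.slice digits (some 0) (some r)] else [])
        ++ (List.range q).map
              (fun j : Nat => PySem.Str.slice digits (some (r + k * (j : Int))) (some (r + k * (j : Int) + k))) := by
    simp only [chunk_numeric_string_py_alt]
    rw [if_neg hguard, ← hn, hremE, ← hr, pvFoldl_app, hcnt, List.map_map]
    rfl
  rw [hA, hB]
  congr 1
  by_cases hrz : r = 0
  · simp [hrz]
  · have hpos : 0 < r := by omega
    simp [hrz, hpos]

-- ===== VERDICT (by name: the statement is the Claim_ definition above) =====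
theorem chunk_numeric_string_py_spec : Claim_equal_chunk_numeric_string_py := by
  intro digits k _
  unfold Spec_chunk_numeric_string_py
  by_cases h : k ≤ 0 ∨ digits.toList = []
  · unfold chunk_numeric_string_py chunk_numeric_string_py_alt
    rw [if_pos h, if_pos h]
  · push_neg at h
    exact pvCore digits k (by omega) h.2
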